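-- pv_equiv track=rewrite | github.com/taewony/gemina | python/ppt_gen.py | parse_slide_content
-- ===== SOURCE A (Python) =====
-- def parse_slide_content(slide_md):
--     """한 슬라이드의 마크다운에서 제목, 일반 텍스트, 코드 블록을 분리합니다."""
--     title = ""
--     normal_content = []
--     code_blocks = []
--
--     lines = slide_md.strip().split('\n')
--     in_code_block = False
--     current_code_block = []
--
--     # 제목 추출 로직 개선
--     if lines and (lines[0].strip().startswith('# ') or lines[0].strip().startswith('## ')):
--         title = lines[0].lstrip('# ').strip()
--         lines = lines[1:]
--     elif lines:
--         # #, ##가 없으면 첫 줄을 제목으로 사용하지 않고, 일반 콘텐츠로 처리할 수 있습니다.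
--         pass
--
--     for line in lines:
--         if line.strip() == '```':
--             if in_code_block:
--                 code_blocks.append('\n'.join(current_code_block))
--                 current_code_block = []
--             in_code_block = not in_code_block
--         elif in_code_block:
--             current_code_block.append(line)
--         else:
--             normal_content.append(line)
--
--     return title, '\n'.join(normal_content).strip(), code_blocks
-- ===== SOURCE B (Python) =====
-- def _split_segments(segments):
--     # consume segments two at a time: normal run, then code block
--     if not segments:
--         return [], []
--     if len(segments) == 1:
--         return list(segments[0]), []
--     normal, codes = _split_segments(segments[2:])
--     return list(segments[0]) + normal, ['\n'.join(segments[1])] + codes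
--
--
-- def parse_slide_content(slide_md):
--     title = ""
--     lines = slide_md.strip().split('\n')
--     if lines and (lines[0].strip().startswith('# ') or lines[0].strip().startswith('## ')):
--         title = lines[0].lstrip('# ').strip()
--         lines = lines[1:]
--     # split the remaining lines into maximal fence-free segments
--     segments = []
--     cur = []
--     for line in lines:
--         if line.strip() == '```':
--             segments.append(cur)
--             cur = []
--         else:
--             cur.append(line)
--     segments.append(cur)
--     if len(segments) % 2 == 0:
--         # odd number of fences: the trailing unterminated code block is discarded
--         segments.pop()
--     normal, code_blocks = _split_segments(segments)
--     return title, '\n'.join(normal).strip(), code_blocks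
-- ===== Notes on version B (the rewrite author's own statement) =====
-- stated objective: alternative
-- what changed: Replaces A's in_code_block state machine (toggling a flag and appending to one of three accumulators per line) by splitting the lines into fence-separated segments and reading normal text and code blocks off by segment parity, discarding a trailing unterminated code segment.
import Mathlib
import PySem

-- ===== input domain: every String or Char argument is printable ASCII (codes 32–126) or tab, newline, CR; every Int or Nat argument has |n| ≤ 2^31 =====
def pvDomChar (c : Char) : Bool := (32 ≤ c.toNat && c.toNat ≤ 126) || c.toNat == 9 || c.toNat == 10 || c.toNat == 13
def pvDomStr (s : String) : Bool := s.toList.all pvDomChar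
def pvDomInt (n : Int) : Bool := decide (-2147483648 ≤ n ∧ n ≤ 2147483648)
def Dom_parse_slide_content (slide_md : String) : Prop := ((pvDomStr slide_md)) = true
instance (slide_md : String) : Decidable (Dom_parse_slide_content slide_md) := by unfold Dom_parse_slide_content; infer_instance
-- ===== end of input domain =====

-- B replaces A's in_code_block flag machine by splitting the lines into fence-separated
-- segments and reading code blocks off by segment parity (objective: alternative decomposition).

-- s.lstrip('# '): drop leading chars from the set {'#', ' '} (exact, ported by hand: no PySem lstrip-with-chars primitive)
def pvLstripHashSpace (s : String) : String :=
  String.ofList (s.toList.dropWhile (fun c => c == '#' || c == ' '))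

-- shared title-extraction prelude (character-for-character identical in both Pythons)
def pvLines (slide_md : String) : List String :=
  ((PySem.Str.split? (PySem.Str.strip slide_md) "\n").getD [])

def pvTitleLines (slide_md : String) : String × List String :=
  let lines := pvLines slide_md
  match lines with
  | [] => ("", [])
  | l0 :: rest =>
    if PySem.Str.startswith (PySem.Str.strip l0) "# " || PySem.Str.startswith (PySem.Str.strip l0) "## " then
      (PySem.Str.strip (pvLstripHashSpace l0), rest)
    else
      ("", lines)

-- ===== PORT A =====
-- A's loop state: (in_code_block, current_code_block, normal_content, code_blocks)
def pvStepA (st : Bool × List String × List String × List String) (line : String) :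
    Bool × List String × List String × List String :=
  let (inCode, cur, normal, codes) := st
  if PySem.Str.strip line == "```" then
    if inCode then (!inCode, [], normal, codes ++ [PySem.Str.join "\n" cur])
    else (!inCode, cur, normal, codes)
  else if inCode then (inCode, cur ++ [line], normal, codes)
  else (inCode, cur, normal ++ [line], codes)

def parse_slide_content (slide_md : String) : String × String × List String :=
  let (title, lines) := pvTitleLines slide_md
  let (_, _, normal, codes) := lines.foldl pvStepA (false, [], [], [])
  (title, PySem.Str.strip (PySem.Str.join "\n" normal), codes)

-- ===== PORT B =====
-- B's loop state: (finished segments, current segment)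
def pvStepB (p : List (List String) × List String) (line : String) :
    List (List String) × List String :=
  if PySem.Str.strip line == "```" then (p.1 ++ [p.2], []) else (p.1, p.2 ++ [line])

-- _split_segments: consume segments two at a time (normal run, then code block)
def pvSplitSegs : List (List String) → List String × List String
  | [] => ([], [])
  | [a] => (a, [])
  | a :: b :: rest =>
    (a ++ (pvSplitSegs rest).1, PySem.Str.join "\n" b :: (pvSplitSegs rest).2)

def parse_slide_content_alt (slide_md : String) : String × String × List String :=
  let (title, lines) := pvTitleLines slide_md
  let (segs, cur) := lines.foldl pvStepB ([], [])
  let segments := segs ++ [cur]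
  let segments := if segments.length % 2 == 0 then segments.dropLast else segments
  let (normal, codes) := pvSplitSegs segments
  (title, PySem.Str.strip (PySem.Str.join "\n" normal), codes)

-- ===== PRECONDITION & SPEC =====
def Spec_parse_slide_content (slide_md : String) (out : String × String × List String) : Prop := out = parse_slide_content_alt slide_md
instance (slide_md : String) (out : String × String × List String) : Decidable (Spec_parse_slide_content slide_md out) := by unfold Spec_parse_slide_content; infer_instance

-- ===== CLAIM (what is proved, stated in full; the proofs are below) =====
def Claim_equal_parse_slide_content : Prop := ∀ (slide_md : String), Dom_parse_slide_content slide_md → Spec_parse_slide_content slide_md (parse_slide_content slide_md)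

-- ===== LEMMAS AND PROOFS =====

-- even-indexed / odd-indexed segments of a segment list
mutual
def pvEvens {α : Type} : List α → List α
  | [] => []
  | a :: r => a :: pvOdds r
def pvOdds {α : Type} : List α → List α
  | [] => []
  | _ :: r => pvEvens r
end

theorem pvSplitSegs_eq (l : List (List String)) :
    pvSplitSegs l = ((pvEvens l).flatten, (pvOdds l).map (PySem.Str.join "\n")) := by
  fun_induction pvSplitSegs l with
  | case1 => rfl
  | case2 a => simp [pvEvens, pvOdds]
  | case3 a b rest ih => simp [pvEvens, pvOdds, ih]

theorem pvEvensOdds_append_singleton {α : Type} (l : List α) (x : α) :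
    (pvEvens (l ++ [x]) = if l.length % 2 = 0 then pvEvens l ++ [x] else pvEvens l) ∧
    (pvOdds (l ++ [x]) = if l.length % 2 = 0 then pvOdds l else pvOdds l ++ [x]) := by
  induction l with
  | nil => simp [pvEvens, pvOdds]
  | cons a r ih =>
    have h2 : (a :: r).length % 2 = 0 ↔ ¬ (r.length % 2 = 0) := by simp; omega
    rcases ih with ⟨he, ho⟩
    constructor
    · simp only [List.cons_append, pvEvens, ho]
      by_cases h : r.length % 2 = 0 <;> simp [h] <;> omega
    · simp only [List.cons_append, pvOdds, he]
      by_cases h : r.length % 2 = 0 <;> simp [h] <;> omega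

-- abstraction: B's fold state read as A's fold state
def pvAbs (p : List (List String) × List String) :
    Bool × List String × List String × List String :=
  if p.1.length % 2 = 1 then
    (true, p.2, (pvEvens p.1).flatten, (pvOdds p.1).map (PySem.Str.join "\n"))
  else
    (false, [], (pvEvens p.1).flatten ++ p.2, (pvOdds p.1).map (PySem.Str.join "\n"))

theorem pvStep_comm (p : List (List String) × List String) (line : String) :
    pvStepA (pvAbs p) line = pvAbs (pvStepB p line) := by
  obtain ⟨segs, cur⟩ := p
  have he := (pvEvensOdds_append_singleton segs cur).1
  have ho := (pvEvensOdds_append_singleton segs cur).2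
  by_cases hf : PySem.Str.strip line = "```" <;>
    by_cases hp : segs.length % 2 = 1 <;>
      simp_all [pvStepA, pvStepB, pvAbs, List.length_append,
        Nat.add_mod, (by omega : ¬ segs.length % 2 = 1 ↔ segs.length % 2 = 0)]

theorem pvFold_comm (lines : List String) (p : List (List String) × List String) :
    lines.foldl pvStepA (pvAbs p) = pvAbs (lines.foldl pvStepB p) := by
  induction lines generalizing p with
  | nil => rfl
  | cons l rest ih => simp only [List.foldl_cons, pvStep_comm, ih]

theorem pvLoop_eq (lines : List String) :
    (fun st => (st.2.2.1, st.2.2.2)) (lines.foldl pvStepA (false, [], [], [])) =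
      (fun q =>
        let segments := q.1 ++ [q.2]
        let segments := if segments.length % 2 == 0 then segments.dropLast else segments
        pvSplitSegs segments) (lines.foldl pvStepB ([], [])) := by
  have h0 : (false, ([] : List String), ([] : List String), ([] : List String)) =
      pvAbs (([], []) : List (List String) × List String) := by simp [pvAbs, pvEvens, pvOdds]
  rw [h0, pvFold_comm]
  obtain ⟨segs, cur⟩ := lines.foldl pvStepB ([], [])
  have he := (pvEvensOdds_append_singleton segs cur).1
  have ho := (pvEvensOdds_append_singleton segs cur).2
  by_cases hp : segs.length % 2 = 1
  · -- odd number of fences: B drops the trailing (unterminated code) segment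
    have hc : (segs.length + 1) % 2 = 0 := by omega
    simp [pvAbs, hp, hc, pvSplitSegs_eq]
  · have hp0 : segs.length % 2 = 0 := by omega
    have hc : ¬ ((segs.length + 1) % 2 = 0) := by omega
    simp [pvAbs, hp0, hc, pvSplitSegs_eq, he, ho]

-- ===== VERDICT (by name: the statement is the Claim_ definition above) =====
theorem parse_slide_content_spec : Claim_equal_parse_slide_content := by
  intro slide_md _
  unfold Spec_parse_slide_content parse_slide_content parse_slide_content_alt
  obtain ⟨title, lines⟩ := pvTitleLines slide_md
  have h := pvLoop_eq lines
  simp only at h ⊢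
  rw [Prod.ext_iff] at h
  rw [h.1, h.2]
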